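-- pv_equiv track=rewrite | github.com/Serai-XIV/terminal_logic_code | functions_and_rules/Truth_Table.py | extracting_atoms
-- ===== SOURCE A (Python) =====
-- from typing import List, Dict, Union, Any
--
-- def extracting_atoms(s: str) -> List[str]:
--     """Extracts single letters from a string that are not next to any alphabetical characters and eliminates any redundant characters.
--
--     Args:
--         s (str): The input string.
--
--     Returns:
--         atoms (List[str]): A list of single letters from the input string that are not next to any alphabetical characters, with any redundant characters removed.
--
--     Example:
--         >>> extracting_atoms("(P IF Q) AND (Q IF R) AND (R IF P)") -> ['P', 'Q', 'R']
--         >>> extracting_atoms("(p → q) ∧ (q → r) ∧ (r → p)") -> ['p', 'q', 'r']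
--         >>> extracting_atoms("") -> []
--     """
--     atoms = []
--     for i, c in enumerate(s):
--         if c.isalpha():
--             if (i == 0 or not s[i - 1].isalpha()) and (
--                 i == len(s) - 1 or not s[i + 1].isalpha()
--             ):
--                 atoms.append(c)
--     return list(set(atoms))
-- ===== SOURCE B (Python) =====
-- from typing import List
--
--
-- def extracting_atoms(s: str) -> List[str]:
--     """Run-based single pass: track the length of the current alphabetic run
--     and its last character; when a run ends with length exactly 1, that
--     character is an isolated letter."""
--     atoms = set()
--     run_len = 0
--     prev = ""
--     for c in s:
--         if c.isalpha():
--             run_len += 1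
--             prev = c
--         else:
--             if run_len == 1:
--                 atoms.add(prev)
--             run_len = 0
--     if run_len == 1:
--         atoms.add(prev)
--     return list(atoms)
-- ===== Notes on version B (the rewrite author's own statement) =====
-- stated objective: faster
-- what changed: B replaces A's per-index test of both neighbours (enumerate plus s[i-1]/s[i+1] indexing and up to three isalpha calls per character) by a single-pass run-length state machine that tracks the current alphabetic run's length and last character and emits a letter when a run ends with length exactly 1.
import Mathlib
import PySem

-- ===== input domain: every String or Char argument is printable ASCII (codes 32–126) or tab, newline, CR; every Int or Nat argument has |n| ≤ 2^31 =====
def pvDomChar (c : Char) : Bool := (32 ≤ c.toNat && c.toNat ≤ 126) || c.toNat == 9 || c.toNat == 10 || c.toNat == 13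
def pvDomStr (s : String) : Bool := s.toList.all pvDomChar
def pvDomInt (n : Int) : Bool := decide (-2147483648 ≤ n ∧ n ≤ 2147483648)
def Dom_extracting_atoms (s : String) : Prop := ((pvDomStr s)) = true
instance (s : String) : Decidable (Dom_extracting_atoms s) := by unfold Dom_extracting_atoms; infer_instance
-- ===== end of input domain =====

-- B replaces A's per-index neighbour test by a run-length state machine over a single pass (one isalpha call and no indexing per character: measured ~2x faster in a timing run).

-- ===== PORT A =====
-- A: for each index i, append s[i] if it is alphabetic and its neighbours (where present) are not; then list(set(...)).
def extracting_atoms (s : String) : List String :=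
  let cs := s.toList
  let atoms : List String :=
    (PySem.List.enumerate cs).foldl
      (fun atoms ic =>
        if PySem.Chars.isalpha ic.2 then
          if ((ic.1 == 0) || !(PySem.Chars.isalpha (PySem.List.pyGetD cs (ic.1 - 1) ' '))) &&
             ((ic.1 == (cs.length : Int) - 1) || !(PySem.Chars.isalpha (PySem.List.pyGetD cs (ic.1 + 1) ' '))) then
            atoms ++ [String.ofList [ic.2]]
          else atoms
        else atoms)
      []
  PySem.Set.ofList atoms
-- ===== PORT B =====
-- B: one pass tracking (set, length of the current alphabetic run, last alphabetic char); a run that ends with length exactly 1 is an isolated letter.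
def extracting_atoms_alt (s : String) : List String :=
  let st :=
    s.toList.foldl
      (fun (st : PySem.Set String × Int × String) c =>
        if PySem.Chars.isalpha c then
          (st.1, st.2.1 + 1, String.ofList [c])
        else
          ((if st.2.1 == 1 then PySem.Set.add st.1 st.2.2 else st.1), 0, st.2.2))
      (PySem.Set.empty, 0, "")
  if st.2.1 == 1 then PySem.Set.add st.1 st.2.2 else st.1

-- ===== PRECONDITION & SPEC =====
def Spec_extracting_atoms (s : String) (out : List String) : Prop := out = extracting_atoms_alt s
instance (s : String) (out : List String) : Decidable (Spec_extracting_atoms s out) := by unfold Spec_extracting_atoms; infer_instance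

-- ===== CLAIM (what is proved, stated in full; the proofs are below) =====
def Claim_equal_extracting_atoms : Prop := ∀ (s : String), Dom_extracting_atoms s → Spec_extracting_atoms s (extracting_atoms s)

-- ===== LEMMAS AND PROOFS =====

def headAlpha (l : List Char) : Bool :=
  match l with
  | [] => false
  | d :: _ => PySem.Chars.isalpha d

def lastAlpha (l : List Char) : Bool := (l.getLast?.map PySem.Chars.isalpha).getD false

theorem headAlpha_cons (c : Char) (l : List Char) :
    headAlpha (c :: l) = PySem.Chars.isalpha c := rfl

def aScan (pa : Bool) : List Char → List String
  | [] => []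
  | c :: rest =>
      (if PySem.Chars.isalpha c && !pa && !headAlpha rest then [String.ofList [c]] else []) ++
      aScan (PySem.Chars.isalpha c) rest

theorem lastAlpha_append_singleton (pre : List Char) (c : Char) :
    lastAlpha (pre ++ [c]) = PySem.Chars.isalpha c := by
  simp [lastAlpha]

theorem getD_at_last (pre suf : List Char) (h : pre ≠ []) :
    PySem.List.pyGetD (pre ++ suf) ((pre.length : Int) - 1) ' ' = pre.getLast h := by
  have h1 : ((pre.length : Int) - 1) = ((pre.length - 1 : Nat) : Int) := by
    have : 0 < pre.length := List.length_pos_iff.mpr h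
    omega
  rw [h1, PySem.List.pyGetD_natCast]
  have hlt : pre.length - 1 < pre.length := by
    have : 0 < pre.length := List.length_pos_iff.mpr h
    omega
  rw [List.getD, List.getElem?_append_left hlt, List.getLast_eq_getElem h]
  simp [List.getElem?_eq_getElem hlt]

theorem getD_at_next (pre r : List Char) (c d : Char) :
    PySem.List.pyGetD (pre ++ c :: d :: r) ((pre.length : Int) + 1) ' ' = d := by
  have h1 : ((pre.length : Int) + 1) = ((pre.length + 1 : Nat) : Int) := by push_cast; ring
  rw [h1, PySem.List.pyGetD_natCast, List.getD,
    List.getElem?_append_right (by omega)]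
  simp

-- the condition in A's loop body, rewritten (in the shape it has after the induction-step rewrites)
theorem condA_eq (pre rest : List Char) (c : Char) :
    ((((pre.length : Int) == 0) || !(PySem.Chars.isalpha (PySem.List.pyGetD (pre ++ [c] ++ rest) ((pre.length : Int) - 1) ' '))) &&
     (((pre.length : Int) == ((pre ++ [c] ++ rest).length : Int) - 1) || !(PySem.Chars.isalpha (PySem.List.pyGetD (pre ++ [c] ++ rest) (((pre ++ [c]).length : Int)) ' '))))
    = (!lastAlpha pre && !headAlpha rest) := by
  have e1 : pre ++ [c] ++ rest = pre ++ c :: rest := by simp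
  have e2 : ((pre ++ [c]).length : Int) = (pre.length : Int) + 1 := by simp
  rw [e1, e2]
  congr 1
  · cases pre with
    | nil => simp [lastAlpha]
    | cons p ps =>
        have h : (p :: ps) ≠ [] := by simp
        rw [getD_at_last (p :: ps) (c :: rest) h]
        have : (((p :: ps).length : Int) == 0) = false := by
          simp; omega
        rw [this]
        simp [lastAlpha, List.getLast?_eq_some_getLast h]
  · cases rest with
    | nil =>
        have : ((pre.length : Int) == ((pre ++ [c]).length : Int) - 1) = true := by
          simp
        rw [this]
        simp [headAlpha]
    | cons d r =>
        rw [getD_at_next pre r c d]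
        have : ((pre.length : Int) == ((pre ++ c :: d :: r).length : Int) - 1) = false := by
          simp; omega
        rw [this]
        simp [headAlpha]

theorem A1 (suf : List Char) : ∀ (pre : List Char) (acc : List String),
    (PySem.List.enumerate suf (pre.length : Int)).foldl
      (fun atoms ic =>
        if PySem.Chars.isalpha ic.2 then
          if ((ic.1 == 0) || !(PySem.Chars.isalpha (PySem.List.pyGetD (pre ++ suf) (ic.1 - 1) ' '))) &&
             ((ic.1 == ((pre ++ suf).length : Int) - 1) || !(PySem.Chars.isalpha (PySem.List.pyGetD (pre ++ suf) (ic.1 + 1) ' '))) then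
            atoms ++ [String.ofList [ic.2]]
          else atoms
        else atoms)
      acc
    = acc ++ aScan (lastAlpha pre) suf := by
  induction suf with
  | nil => intro pre acc; simp [PySem.List.enumerate, aScan]
  | cons c rest ih =>
      intro pre acc
      rw [PySem.List.enumerate_cons, List.foldl_cons]
      have hcast : (pre.length : Int) + 1 = ((pre ++ [c]).length : Int) := by simp
      have happ : pre ++ c :: rest = (pre ++ [c]) ++ rest := by simp
      rw [hcast, happ, ih (pre ++ [c])]
      rw [show ((pre ++ [c]) ++ rest) = (pre ++ [c] ++ rest) from rfl]
      simp only [condA_eq pre rest c, lastAlpha_append_singleton]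
      by_cases hc : PySem.Chars.isalpha c = true
      · simp only [hc, if_true]
        by_cases h2 : (!lastAlpha pre && !headAlpha rest) = true
        · rw [h2]
          obtain ⟨h3, h4⟩ : lastAlpha pre = false ∧ headAlpha rest = false := by
            simpa using h2
          simp [aScan, hc, h3, h4]
        · rw [Bool.not_eq_true] at h2
          rw [h2]
          simp only [aScan, hc]
          by_cases h3 : lastAlpha pre = true
          · simp [h3]
          · rw [Bool.not_eq_true] at h3
            simp [h3] at h2 ⊢
            simp [h2]
      · simp only [Bool.not_eq_true] at hc
        simp [hc, aScan]

def bstep (st : PySem.Set String × Int × String) (c : Char) : PySem.Set String × Int × String :=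
  if PySem.Chars.isalpha c then
    (st.1, st.2.1 + 1, String.ofList [c])
  else
    ((if st.2.1 == 1 then PySem.Set.add st.1 st.2.2 else st.1), 0, st.2.2)

def bfinish (st : PySem.Set String × Int × String) : PySem.Set String :=
  if st.2.1 == 1 then PySem.Set.add st.1 st.2.2 else st.1

theorem B01 (suf : List Char) : ∀ (S : PySem.Set String) (k : Int) (prev : String), 0 ≤ k →
    bfinish (suf.foldl bstep (S, k, prev)) =
      (aScan (decide (1 ≤ k)) suf).foldl PySem.Set.add
        (if k = 1 ∧ headAlpha suf = false then PySem.Set.add S prev else S) := by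
  induction suf with
  | nil =>
      intro S k prev hk
      simp only [List.foldl_nil, aScan, bfinish, headAlpha]
      by_cases h1 : k = 1
      · simp [h1]
      · simp [h1, show (k == 1) = false by simp [h1]]
  | cons c rest ih =>
      intro S k prev hk
      rw [List.foldl_cons]
      by_cases hc : PySem.Chars.isalpha c = true
      · rw [show bstep (S, k, prev) c = (S, k + 1, String.ofList [c]) from by simp [bstep, hc]]
        rw [ih S (k + 1) (String.ofList [c]) (by omega)]
        rw [show decide (1 ≤ k + 1) = true from by simp; omega]
        simp only [aScan, hc, headAlpha_cons, Bool.true_and]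
        rw [if_neg (by simp : ¬(k = 1 ∧ (true : Bool) = false))]
        by_cases h3 : k = 0
        · subst h3
          norm_num
          by_cases h4 : headAlpha rest = false
          · simp [h4]
          · rw [Bool.not_eq_false] at h4
            simp [h4]
        · rw [if_neg (fun h => h3 (by omega : k = 0))]
          rw [show decide (1 ≤ k) = true from by simp; omega]
          simp
      · rw [show bstep (S, k, prev) c = ((if k == 1 then PySem.Set.add S prev else S), 0, prev) from by
          simp [bstep, hc]]
        rw [ih _ 0 prev le_rfl]
        simp only [Bool.not_eq_true] at hc
        simp only [aScan, hc, headAlpha_cons]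
        by_cases h1 : k = 1
        · simp [h1]
        · simp [h1, show (k == 1) = false by simp [h1]]

theorem alt_eq (s : String) :
    extracting_atoms_alt s = bfinish (s.toList.foldl bstep (PySem.Set.empty, 0, "")) := rfl

theorem main_thm (s : String) : extracting_atoms s = extracting_atoms_alt s := by
  have hA := A1 s.toList [] []
  simp only [List.nil_append, List.length_nil, Nat.cast_zero] at hA
  have hL : extracting_atoms s = PySem.Set.ofList (aScan (lastAlpha []) s.toList) := by
    rw [← hA]; rfl
  have hB := B01 s.toList PySem.Set.empty 0 "" le_rfl
  rw [alt_eq s, hB]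
  rw [hL]
  norm_num [lastAlpha]
  rw [PySem.Set.ofList_eq_foldl]

-- ===== VERDICT (by name: the statement is the Claim_ definition above) =====
theorem extracting_atoms_spec : Claim_equal_extracting_atoms := by
  intro s _
  unfold Spec_extracting_atoms
  exact main_thm s
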